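-- pv_equiv track=rewrite | github.com/Inmarsat/idpmodem | idpmodem/idpmodem_old.py | _bytearray_to_str
-- ===== SOURCE A (Python) =====
-- from string import printable
--
-- def _bytearray_to_str(arr):
--     s = ''
--     for b in bytearray(arr):
--         if chr(b) in printable:
--             s += chr(b)
--         else:
--             s += '{0:#04x}'.format(b).replace('0x', '\\')
--     return s
-- ===== SOURCE B (Python) =====
-- from string import printable
--
-- # Precomputed 256-entry lookup table: printable bytes map to their character,
-- # the rest to a backslash-hex escape.  The function is then a single join over
-- # table lookups; bytearray(arr) keeps the same validation as the original.
-- _TABLE = [chr(i) if chr(i) in printable else '{0:#04x}'.format(i).replace('0x', '\\')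
--           for i in range(256)]
--
-- def _bytearray_to_str(arr):
--     return ''.join(_TABLE[b] for b in bytearray(arr))
-- ===== Notes on version B (the rewrite author's own statement) =====
-- stated objective: simpler
-- what changed: Replaces the incremental string concatenation with a per-byte printable-membership scan by a 256-entry lookup table computed once, so the function body is a single join over table lookups.
import Mathlib
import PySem

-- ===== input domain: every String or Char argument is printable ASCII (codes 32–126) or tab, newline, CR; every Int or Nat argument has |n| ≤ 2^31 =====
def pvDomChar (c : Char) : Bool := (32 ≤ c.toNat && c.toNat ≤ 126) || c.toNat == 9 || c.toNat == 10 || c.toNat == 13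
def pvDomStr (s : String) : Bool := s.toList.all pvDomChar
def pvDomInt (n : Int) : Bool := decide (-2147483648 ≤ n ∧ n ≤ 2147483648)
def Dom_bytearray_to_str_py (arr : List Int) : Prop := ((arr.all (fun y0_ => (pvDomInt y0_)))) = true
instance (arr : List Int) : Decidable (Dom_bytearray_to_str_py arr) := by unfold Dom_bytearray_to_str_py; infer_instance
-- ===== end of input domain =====

-- B precomputes a 256-entry lookup table once and joins table lookups, instead of
-- A's per-byte printable-membership branch with incremental concatenation (objective: simpler).

-- ===== PORT A =====
-- string.printable, in CPython's exact order (digits, letters, punctuation, whitespace)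
def pvPrintableA : String := "0123456789abcdefghijklmnopqrstuvwxyzABCDEFGHIJKLMNOPQRSTUVWXYZ!\"#$%&'()*+,-./:;<=>?@[\\]^_`{|}~ \t\n\r\x0b\x0c"
def pvHexDigitA (n : Nat) : Char := if n < 10 then Char.ofNat (48 + n) else Char.ofNat (87 + n)
-- '{0:#04x}'.format(b).replace('0x', '\\'): exact for 0 ≤ b < 256 (the only bytes bytearray yields)
def pvEscA (b : Int) : String := String.ofList ['\\', pvHexDigitA (b.toNat / 16), pvHexDigitA (b.toNat % 16)]
def bytearray_to_str_py (arr : List Int) : String :=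
  arr.foldl (fun s b =>
    if pvPrintableA.toList.contains (Char.ofNat b.toNat) then
      s ++ String.ofList [Char.ofNat b.toNat]
    else
      s ++ pvEscA b) ""

-- ===== PORT B =====
def pvPrintableB : String := "0123456789abcdefghijklmnopqrstuvwxyzABCDEFGHIJKLMNOPQRSTUVWXYZ!\"#$%&'()*+,-./:;<=>?@[\\]^_`{|}~ \t\n\r\x0b\x0c"
def pvHexDigitB (n : Nat) : Char := if n < 10 then Char.ofNat (48 + n) else Char.ofNat (87 + n)
def pvEscB (i : Nat) : String := String.ofList ['\\', pvHexDigitB (i / 16), pvHexDigitB (i % 16)]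
-- the precomputed table: _TABLE[i] for i in range(256)
def pvTable : List String :=
  (List.range 256).map (fun i =>
    if pvPrintableB.toList.contains (Char.ofNat i) then String.ofList [Char.ofNat i] else pvEscB i)
def bytearray_to_str_py_alt (arr : List Int) : String :=
  String.join (arr.map (fun b => pvTable.getD b.toNat ""))

-- ===== PRECONDITION & SPEC =====
-- bytearray(arr) raises ValueError unless every element is in range(256); exactly those inputs are excluded.
def Pre_bytearray_to_str_py (arr : List Int) : Prop := ∀ b ∈ arr, 0 ≤ b ∧ b < 256
instance (arr : List Int) : Decidable (Pre_bytearray_to_str_py arr) := by unfold Pre_bytearray_to_str_py; infer_instance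
def pvWitness_bytearray_to_str_py : List Int := [0, 9, 65, 255, 13]
def Spec_bytearray_to_str_py (arr : List Int) (out : String) : Prop := out = bytearray_to_str_py_alt arr
instance (arr : List Int) (out : String) : Decidable (Spec_bytearray_to_str_py arr out) := by unfold Spec_bytearray_to_str_py; infer_instance

-- ===== CLAIM (what is proved, stated in full; the proofs are below) =====
def Claim_equal_bytearray_to_str_py : Prop := ∀ (arr : List Int), Dom_bytearray_to_str_py arr → Pre_bytearray_to_str_py arr → Spec_bytearray_to_str_py arr (bytearray_to_str_py arr)

-- ===== LEMMAS AND PROOFS =====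

-- a table lookup for an in-range byte is exactly A's per-byte branch
lemma pvTable_getD (b : Int) (h0 : 0 ≤ b) (h1 : b < 256) :
    pvTable.getD b.toNat "" =
      (if pvPrintableA.toList.contains (Char.ofNat b.toNat) then
        String.ofList [Char.ofNat b.toNat]
      else pvEscA b) := by
  have hlt : b.toNat < 256 := by omega
  simp [pvTable, List.getD, hlt]
  rfl

lemma join_shift (a : String) (l : List String) :
    l.foldl (· ++ ·) a = a ++ l.foldl (· ++ ·) "" := by
  induction l generalizing a with
  | nil => simp
  | cons x l ih =>
    simp only [List.foldl_cons]
    rw [ih (a ++ x), ih ("" ++ x), String.append_assoc]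
    simp

lemma foldl_eq_join (xs : List Int) (s : String)
    (h : ∀ b ∈ xs, 0 ≤ b ∧ b < 256) :
    xs.foldl (fun s b =>
      if pvPrintableA.toList.contains (Char.ofNat b.toNat) then
        s ++ String.ofList [Char.ofNat b.toNat]
      else
        s ++ pvEscA b) s
    = s ++ String.join (xs.map (fun b => pvTable.getD b.toNat "")) := by
  induction xs generalizing s with
  | nil => simp [String.join]
  | cons x xs ih =>
    have hx := h x (by simp)
    have hrest : ∀ b ∈ xs, 0 ≤ b ∧ b < 256 := fun b hb => h b (by simp [hb])
    simp only [List.foldl_cons, List.map_cons, String.join]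
    rw [ih _ hrest, join_shift]
    rw [pvTable_getD x hx.1 hx.2]
    split_ifs <;> simp [String.join, String.append_assoc]

-- ===== VERDICT (by name: the statement is the Claim_ definition above) =====
theorem bytearray_to_str_py_spec : Claim_equal_bytearray_to_str_py := by
  intro arr _ hpre
  unfold Spec_bytearray_to_str_py bytearray_to_str_py bytearray_to_str_py_alt
  rw [foldl_eq_join arr "" hpre]
  simp
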